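-- pv_equiv track=rewrite | github.com/zaidbharde/CHAOS-MACHINE | term/ASCII_ART.py | _draw_circle
-- ===== SOURCE A (Python) =====
-- def _draw_circle(radius):
--     """Draw a circle."""
--     lines = []
--     for y in range(-radius, radius + 1):
--         line = ""
--         for x in range(-radius, radius + 1):
--             if abs(x*x + y*y - radius*radius) < radius:
--                 line += "*"
--             else:
--                 line += " "
--         lines.append(line)
--     return '\n'.join(lines)
-- ===== SOURCE B (Python) =====
-- def _isqrt(n):
--     """Integer square root of n >= 0, by linear search (no imports)."""
--     x = 0
--     while (x + 1) * (x + 1) <= n: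
--         x += 1
--     return x
--
--
-- def _draw_circle(radius):
--     """Draw a circle."""
--     r2 = radius * radius
--     lines = []
--     for y in range(-radius, radius + 1):
--         lo = r2 - radius - y * y   # star at x  iff  lo < x*x < hi
--         hi = r2 + radius - y * y
--         if hi <= 0:
--             lines.append(" " * (2 * radius + 1))
--             continue
--         b = _isqrt(hi - 1)
--         a = 0 if lo < 0 else _isqrt(lo) + 1
--         if a > b:
--             lines.append(" " * (2 * radius + 1))
--         elif a == 0:
--             lines.append(" " * (radius - b) + "*" * (2 * b + 1) + " " * (radius - b))
--         else:
--             arc = "*" * (b - a + 1)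
--             lines.append(" " * (radius - b) + arc + " " * (2 * a - 1) + arc + " " * (radius - b))
--     return "\n".join(lines)
-- ===== Notes on version B (the rewrite author's own statement) =====
-- stated objective: faster
-- what changed: Instead of testing every cell with abs(x*x+y*y-r*r) < r, B computes per row the integer band bounds lo = r^2-r-y^2 and hi = r^2+r-y^2, derives the (up to two) symmetric star intervals via an integer square root, and assembles each line from whole character runs.
import Mathlib
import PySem

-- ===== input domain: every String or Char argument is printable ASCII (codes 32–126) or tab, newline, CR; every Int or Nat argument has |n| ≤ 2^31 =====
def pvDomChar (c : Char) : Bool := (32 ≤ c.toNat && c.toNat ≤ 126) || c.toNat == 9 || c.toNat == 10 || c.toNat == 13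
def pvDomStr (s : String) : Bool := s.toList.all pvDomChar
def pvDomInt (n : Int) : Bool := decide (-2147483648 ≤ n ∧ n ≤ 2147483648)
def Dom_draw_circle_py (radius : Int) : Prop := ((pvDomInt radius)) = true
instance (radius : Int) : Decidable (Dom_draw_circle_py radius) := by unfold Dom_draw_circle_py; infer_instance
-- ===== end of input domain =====

-- B replaces A's per-cell scan-and-test inner loop by per-row analytic interval endpoints
-- (integer square roots of the band bounds) and assembles each line from character runs.


-- ===== PORT A =====
-- the inner loop of A: line = ""; for x in range(-radius, radius+1): line += "*"/" "
def circleLineA (radius y : Int) : String :=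
  (PySem.List.pyRange (-radius) (radius + 1) 1).foldl
    (fun line x => line ++ (if |x * x + y * y - radius * radius| < radius then "*" else " ")) ""

def draw_circle_py (radius : Int) : String :=
  PySem.Str.join "\n"
    ((PySem.List.pyRange (-radius) (radius + 1) 1).foldl
      (fun lines y => lines ++ [circleLineA radius y]) [])

-- ===== PORT B =====
-- Source B's _isqrt: linear-search integer square root (while loop ported with fuel n+1, enough
-- since the loop stops after at most isqrt(n) ≤ n increments)
def isqrtGoB (n : Int) : Nat → Int → Int
  | 0, x => x
  | fuel + 1, x => if (x + 1) * (x + 1) ≤ n then isqrtGoB n fuel (x + 1) else x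

def isqrtB (n : Int) : Int := isqrtGoB n (n.toNat + 1) 0

-- hand port of Python's '"c" * n' (empty string for n ≤ 0); exact
def strRepeatB (c : Char) (n : Int) : String := String.ofList (List.replicate n.toNat c)

def circleLineB (radius y : Int) : String :=
  let r2 := radius * radius
  let lo := r2 - radius - y * y
  let hi := r2 + radius - y * y
  if hi ≤ 0 then strRepeatB ' ' (2 * radius + 1)
  else
    let b := isqrtB (hi - 1)
    let a := if lo < 0 then 0 else isqrtB lo + 1
    if a > b then strRepeatB ' ' (2 * radius + 1)
    else if a = 0 then
      strRepeatB ' ' (radius - b) ++ strRepeatB '*' (2 * b + 1) ++ strRepeatB ' ' (radius - b)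
    else
      let arc := strRepeatB '*' (b - a + 1)
      strRepeatB ' ' (radius - b) ++ arc ++ strRepeatB ' ' (2 * a - 1) ++ arc ++ strRepeatB ' ' (radius - b)

def draw_circle_py_alt (radius : Int) : String :=
  PySem.Str.join "\n"
    ((PySem.List.pyRange (-radius) (radius + 1) 1).foldl
      (fun lines y => lines ++ [circleLineB radius y]) [])

-- ===== PRECONDITION & SPEC =====
def Spec_draw_circle_py (radius : Int) (out : String) : Prop := out = draw_circle_py_alt radius
instance (radius : Int) (out : String) : Decidable (Spec_draw_circle_py radius out) := by unfold Spec_draw_circle_py; infer_instance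

-- ===== CLAIM (what is proved, stated in full; the proofs are below) =====
def Claim_equal_draw_circle_py : Prop := ∀ (radius : Int), Dom_draw_circle_py radius → Spec_draw_circle_py radius (draw_circle_py radius)

-- ===== LEMMAS AND PROOFS =====

lemma isqrtGoB_eq (n : Int) (hn : 0 ≤ n) :
    ∀ (fuel : Nat) (x : Int), 0 ≤ x → x * x ≤ n → Nat.sqrt n.toNat < x.toNat + fuel →
      isqrtGoB n fuel x = (Nat.sqrt n.toNat : Int) := by
  intro fuel
  induction fuel with
  | zero =>
    intro x hx hxx hf
    exfalso
    have h1 : x.toNat * x.toNat ≤ n.toNat := by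
      have : (x.toNat : Int) = x := Int.toNat_of_nonneg hx
      have : ((x.toNat * x.toNat : Nat) : Int) ≤ (n.toNat : Int) := by
        push_cast
        rw [Int.toNat_of_nonneg hx, Int.toNat_of_nonneg hn]
        exact hxx
      exact_mod_cast this
    have := Nat.le_sqrt.mpr h1
    omega
  | succ f ih =>
    intro x hx hxx hf
    rw [isqrtGoB]
    split_ifs with h
    · have hx1 : (x + 1).toNat = x.toNat + 1 := by omega
      rw [ih (x + 1) (by omega) h (by omega)]
    · -- n < (x+1)^2 and x*x ≤ n pin x = sqrt n
      have hlt : n < (x + 1) * (x + 1) := by omega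
      have h1 : x.toNat * x.toNat ≤ n.toNat := by
        have : ((x.toNat * x.toNat : Nat) : Int) ≤ (n.toNat : Int) := by
          push_cast
          rw [Int.toNat_of_nonneg hx, Int.toNat_of_nonneg hn]
          exact hxx
        exact_mod_cast this
      have h2 : n.toNat < (x.toNat + 1) * (x.toNat + 1) := by
        have : (n.toNat : Int) < ((x.toNat + 1) * (x.toNat + 1) : Nat) := by
          push_cast
          rw [Int.toNat_of_nonneg hx, Int.toNat_of_nonneg hn]
          exact hlt
        exact_mod_cast this
      have hle := Nat.le_sqrt.mpr h1
      have hlt2 := Nat.sqrt_lt.mpr h2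
      have : x.toNat = Nat.sqrt n.toNat := by omega
      rw [← this, Int.toNat_of_nonneg hx]

lemma isqrtB_eq (n : Int) (hn : 0 ≤ n) : isqrtB n = (Nat.sqrt n.toNat : Int) := by
  apply isqrtGoB_eq n hn (n.toNat + 1) 0 le_rfl (by positivity)
  have := Nat.sqrt_le_self n.toNat
  omega

lemma isqrtB_nonneg (n : Int) (hn : 0 ≤ n) : 0 ≤ isqrtB n := by
  rw [isqrtB_eq n hn]; positivity

lemma sq_le_isqrt_iff (n : Int) (hn : 0 ≤ n) (x : Int) : x * x ≤ n ↔ |x| ≤ isqrtB n := by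
  rw [isqrtB_eq n hn, Int.abs_eq_natAbs, ← Int.natAbs_mul_self]
  have h1 : ((x.natAbs * x.natAbs : Nat) : Int) ≤ n ↔ x.natAbs * x.natAbs ≤ n.toNat := by
    generalize x.natAbs * x.natAbs = m
    omega
  rw [h1, ← Nat.le_sqrt]
  exact (Nat.cast_le (α := Int)).symm

lemma isqrt_lt_sq_iff (n : Int) (hn : 0 ≤ n) (x : Int) : n < x * x ↔ isqrtB n < |x| := by
  rw [isqrtB_eq n hn, Int.abs_eq_natAbs, ← Int.natAbs_mul_self]
  have h1 : n < ((x.natAbs * x.natAbs : Nat) : Int) ↔ n.toNat < x.natAbs * x.natAbs := by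
    generalize x.natAbs * x.natAbs = m
    omega
  rw [h1, ← Nat.sqrt_lt]
  exact (Nat.cast_lt (α := Int)).symm

-- the star condition of A, characterized by the interval bounds of B
lemma star_iff (r y x a b : Int) (hhi : 0 < r * r + r - y * y)
    (hb : b = isqrtB (r * r + r - y * y - 1))
    (ha : a = if r * r - r - y * y < 0 then 0 else isqrtB (r * r - r - y * y) + 1) :
    (|x * x + y * y - r * r| < r ↔ ((-b ≤ x ∧ x ≤ -a) ∨ (a ≤ x ∧ x ≤ b))) := by
  have hxx : 0 ≤ x * x := mul_self_nonneg x
  have hb0 : 0 ≤ b := hb ▸ isqrtB_nonneg _ (by omega)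
  have hstep1 : |x * x + y * y - r * r| < r ↔
      (r * r - r - y * y < x * x ∧ x * x < r * r + r - y * y) := by
    rw [abs_lt]; constructor <;> intro h <;> exact ⟨by linarith [h.1], by linarith [h.2]⟩
  have hhiiff : x * x < r * r + r - y * y ↔ |x| ≤ b := by
    rw [hb, ← sq_le_isqrt_iff _ (by omega)]; omega
  have hloiff : r * r - r - y * y < x * x ↔ a ≤ |x| := by
    by_cases hlo : r * r - r - y * y < 0
    · rw [ha, if_pos hlo]
      constructor
      · intro _; exact abs_nonneg x
      · intro _; omega
    · rw [ha, if_neg hlo, Int.add_one_le_iff, ← isqrt_lt_sq_iff _ (by omega)]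
  have ha0 : 0 ≤ a := by
    rw [ha]; split_ifs with h
    · exact le_rfl
    · have := isqrtB_nonneg (r * r - r - y * y) (by omega); omega
  rw [hstep1, and_comm, hhiiff, hloiff]
  rcases abs_cases x with ⟨hax, _⟩ | ⟨hax, _⟩ <;> rw [hax] <;> omega

lemma map_range_eq_replicate (f : Int → Char) (c : Char) (lo hi : Int)
    (h : ∀ x, lo ≤ x → x < hi → f x = c) :
    (PySem.List.pyRange lo hi 1).map f = List.replicate (hi - lo).toNat c := by
  rw [List.eq_replicate_iff]
  refine ⟨by simp [PySem.List.length_pyRange_one], ?_⟩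
  intro ch hch
  obtain ⟨x, hx, rfl⟩ := List.mem_map.mp hch
  obtain ⟨h1, h2⟩ := PySem.List.mem_pyRange_one.mp hx
  exact h x h1 h2

lemma toList_lineA_general (P : Int → Prop) [DecidablePred P] (l : List Int) (init : String) :
    (l.foldl (fun line x => line ++ (if P x then "*" else " ")) init).toList
      = init.toList ++ l.map (fun x => if P x then '*' else ' ') := by
  induction l generalizing init with
  | nil => simp
  | cons x xs ih =>
    simp only [List.foldl_cons, List.map_cons, ih, String.toList_append]
    split_ifs <;> simp

lemma foldl_snoc_map {α β : Type} (f : α → β) (l : List α) (init : List β) :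
    l.foldl (fun acc y => acc ++ [f y]) init = init ++ l.map f := by
  induction l generalizing init with
  | nil => simp
  | cons x xs ih => simp [ih]

lemma toList_strRepeatB (c : Char) (n : Int) : (strRepeatB c n).toList = List.replicate n.toNat c := by
  simp [strRepeatB]

-- each row of A equals the corresponding row of B
lemma line_eq (r y : Int) (hr : 0 ≤ r) (hy1 : -r ≤ y) (hy2 : y ≤ r) :
    circleLineA r y = circleLineB r y := by
  apply String.toList_inj.mp
  rw [circleLineA, toList_lineA_general (fun x => |x * x + y * y - r * r| < r)]
  simp only [String.toList_empty, List.nil_append]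
  by_cases hhi : r * r + r - y * y ≤ 0
  · -- empty row
    rw [circleLineB]
    simp only [if_pos hhi, toList_strRepeatB]
    rw [map_range_eq_replicate _ ' ' (-r) (r + 1) ?_]
    · congr 1
      omega
    · intro x h1 h2
      rw [if_neg]
      intro habs
      have := abs_lt.mp habs
      nlinarith [mul_self_nonneg x]
  · rw [not_le] at hhi
    have hr1 : 1 ≤ r := by
      rcases eq_or_lt_of_le hr with h | h
      · exfalso; nlinarith [mul_self_nonneg y]
      · omega
    set b := isqrtB (r * r + r - y * y - 1) with hbdef
    set a := (if r * r - r - y * y < 0 then 0 else isqrtB (r * r - r - y * y) + 1) with hadef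
    have hb0 : 0 ≤ b := isqrtB_nonneg _ (by omega)
    have ha0 : 0 ≤ a := by
      rw [hadef]; split_ifs with h
      · exact le_rfl
      · have := isqrtB_nonneg (r * r - r - y * y) (by omega); omega
    have hbr : b ≤ r := by
      by_contra hcon
      rw [not_le] at hcon
      have hbb : b * b ≤ r * r + r - y * y - 1 :=
        (sq_le_isqrt_iff _ (by omega) b).mpr (by rw [abs_of_nonneg hb0])
      nlinarith [mul_self_nonneg y]
    have hstar := fun x => star_iff r y x a b hhi hbdef hadef
    rw [circleLineB]
    simp only [if_neg (by omega : ¬ (r * r + r - y * y ≤ 0)), ← hbdef, ← hadef]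
    by_cases hab : a > b
    · simp only [if_pos hab, toList_strRepeatB]
      rw [map_range_eq_replicate _ ' ' (-r) (r + 1) ?_]
      · congr 1
        omega
      · intro x h1 h2
        rw [if_neg]
        rw [hstar x]
        omega
    · rw [not_lt] at hab
      by_cases ha : a = 0
      · -- one central run of stars
        simp only [if_neg (by omega : ¬ a > b), if_pos ha, String.toList_append, toList_strRepeatB]
        rw [PySem.List.pyRange_one_append (-r) (-b) (r + 1) (by omega) (by omega),
            PySem.List.pyRange_one_append (-b) (b + 1) (r + 1) (by omega) (by omega),
            List.map_append, List.map_append]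
        rw [map_range_eq_replicate _ ' ' (-r) (-b) (fun x h1 h2 => by rw [if_neg]; rw [hstar x]; omega),
            map_range_eq_replicate _ '*' (-b) (b + 1) (fun x h1 h2 => by rw [if_pos]; rw [hstar x]; omega),
            map_range_eq_replicate _ ' ' (b + 1) (r + 1) (fun x h1 h2 => by rw [if_neg]; rw [hstar x]; omega)]
        have e1 : -b - -r = r - b := by ring
        have e2 : b + 1 - -b = 2 * b + 1 := by ring
        have e3 : r + 1 - (b + 1) = r - b := by ring
        rw [e1, e2, e3]
        simp [List.append_assoc]
      · -- two arcs with a central gap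
        simp only [if_neg (by omega : ¬ a > b), if_neg ha, String.toList_append, toList_strRepeatB]
        rw [PySem.List.pyRange_one_append (-r) (-b) (r + 1) (by omega) (by omega),
            PySem.List.pyRange_one_append (-b) (-a + 1) (r + 1) (by omega) (by omega),
            PySem.List.pyRange_one_append (-a + 1) a (r + 1) (by omega) (by omega),
            PySem.List.pyRange_one_append a (b + 1) (r + 1) (by omega) (by omega),
            List.map_append, List.map_append, List.map_append, List.map_append]
        rw [map_range_eq_replicate _ ' ' (-r) (-b) (fun x h1 h2 => by rw [if_neg]; rw [hstar x]; omega),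
            map_range_eq_replicate _ '*' (-b) (-a + 1) (fun x h1 h2 => by rw [if_pos]; rw [hstar x]; omega),
            map_range_eq_replicate _ ' ' (-a + 1) a (fun x h1 h2 => by rw [if_neg]; rw [hstar x]; omega),
            map_range_eq_replicate _ '*' a (b + 1) (fun x h1 h2 => by rw [if_pos]; rw [hstar x]; omega),
            map_range_eq_replicate _ ' ' (b + 1) (r + 1) (fun x h1 h2 => by rw [if_neg]; rw [hstar x]; omega)]
        have e1 : -b - -r = r - b := by ring
        have e2 : -a + 1 - -b = b - a + 1 := by ring
        have e3 : a - (-a + 1) = 2 * a - 1 := by ring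
        have e4 : b + 1 - a = b - a + 1 := by ring
        have e5 : r + 1 - (b + 1) = r - b := by ring
        rw [e1, e2, e3, e4, e5]
        simp [List.append_assoc]

-- ===== VERDICT (by name: the statement is the Claim_ definition above) =====
theorem draw_circle_py_spec : Claim_equal_draw_circle_py := by
  intro radius _
  unfold Spec_draw_circle_py draw_circle_py draw_circle_py_alt
  rw [foldl_snoc_map, foldl_snoc_map, List.nil_append, List.nil_append]
  by_cases hr : radius < 0
  · rw [PySem.List.pyRange_one_eq_nil (by omega)]
    simp
  · rw [not_lt] at hr
    congr 1
    apply List.map_congr_left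
    intro y hy
    obtain ⟨h1, h2⟩ := PySem.List.mem_pyRange_one.mp hy
    exact line_eq radius y hr h1 (by omega)
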